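-- pv_equiv track=rewrite | github.com/MrBrantCode/unitest_baseline | mut_generate/mist_train_taco/taco_5670/solution.py | minimum_magic_tricks
-- ===== SOURCE A (Python) =====
-- def minimum_magic_tricks(T, heights):
--     MOD = 1000000007
--     max_height = 1000
--     m = [0] * (max_height + 1)
--     m[1] = 1
--     m[2] = 1
--
--     for i in range(3, max_height + 1):
--         sum1 = 1
--         j = 1
--         while j < i - 1:
--             sum1 += 2 * m[j]
--             j += 1
--         m[i] = sum1 % MOD
--
--     results = [m[height] for height in heights]
--     return results
-- ===== SOURCE B (Python) =====
-- def minimum_magic_tricks(T, heights):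
--     MOD = 1000000007
--     m = [0, 1, 1]
--     s = 1  # running sum of m[1..i-2]
--     for i in range(3, 1001):
--         m.append((1 + 2 * s) % MOD)
--         s += m[i - 1]
--     return [m[h] for h in heights]
-- ===== Notes on version B (the rewrite author's own statement) =====
-- stated objective: faster
-- what changed: B replaces A's inner while-loop that re-sums m[1..i-2] for every height i by a single running prefix sum carried across the table-building loop, so the fixed 1000-entry table is built in one linear pass.
import Mathlib
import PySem

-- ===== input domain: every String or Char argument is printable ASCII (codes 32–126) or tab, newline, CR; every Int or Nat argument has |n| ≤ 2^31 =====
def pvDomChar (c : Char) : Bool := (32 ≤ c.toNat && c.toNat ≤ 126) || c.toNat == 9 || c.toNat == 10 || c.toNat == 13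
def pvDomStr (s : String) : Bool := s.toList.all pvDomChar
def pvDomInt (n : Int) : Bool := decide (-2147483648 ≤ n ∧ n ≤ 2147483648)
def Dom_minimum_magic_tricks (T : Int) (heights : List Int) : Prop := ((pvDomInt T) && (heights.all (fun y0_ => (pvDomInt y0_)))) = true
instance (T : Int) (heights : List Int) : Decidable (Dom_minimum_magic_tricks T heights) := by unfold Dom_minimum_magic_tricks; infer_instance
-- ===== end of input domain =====

-- B builds the same 1001-entry table with a running prefix sum instead of A's inner re-summing loop; objective: faster table build.

-- ===== PORT A =====
-- the inner `while j < i - 1` loop of A; pyGetD is exact here since 1 ≤ j < i-1 < len m throughout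
def innerLoopA (m : List Int) (i : Int) (sum1 : Int) (j : Int) : Int :=
  if j < i - 1 then innerLoopA m i (sum1 + 2 * PySem.List.pyGetD m j 0) (j + 1) else sum1
termination_by (i - 1 - j).toNat
decreasing_by omega

-- m = [0]*(max_height+1); m[1] = 1; m[2] = 1   (pySetD exact: indices in range)
def m0A : List Int := PySem.List.pySetD (PySem.List.pySetD (List.replicate 1001 (0 : Int)) 1 1) 2 1

-- body of `for i in range(3, max_height + 1)` : m[i] = sum1 % MOD  (sum1 computed by the while loop)
def stepA (m : List Int) (i : Int) : List Int :=
  PySem.List.pySetD m i (PySem.Int.mod (innerLoopA m i 1 1) 1000000007)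

def minimum_magic_tricks (T : Int) (heights : List Int) : List Int :=
  let m := (PySem.List.pyRange 3 1001 1).foldl stepA m0A
  heights.map (fun h => PySem.List.pyGetD m h 0)   -- [m[height] for height in heights]; IndexError excluded by Pre_

-- ===== PORT B =====
-- body of B's loop: m.append((1 + 2*s) % MOD); s += m[i-1]
def stepB (p : List Int × Int) (i : Int) : List Int × Int :=
  let m' := p.1 ++ [PySem.Int.mod (1 + 2 * p.2) 1000000007]
  (m', p.2 + PySem.List.pyGetD m' (i - 1) 0)

def minimum_magic_tricks_alt (T : Int) (heights : List Int) : List Int :=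
  let ms := (PySem.List.pyRange 3 1001 1).foldl stepB ([0, 1, 1], 1)
  heights.map (fun h => PySem.List.pyGetD ms.1 h 0)

-- ===== PRECONDITION & SPEC =====
-- Pre_ excludes exactly the heights on which Python's m[height] raises IndexError (the table has length 1001)
def Pre_minimum_magic_tricks (T : Int) (heights : List Int) : Prop :=
  ∀ h ∈ heights, PySem.Raise.InRange 1001 h
instance (T : Int) (heights : List Int) : Decidable (Pre_minimum_magic_tricks T heights) := by
  unfold Pre_minimum_magic_tricks; infer_instance

def pvWitness_minimum_magic_tricks : Int × List Int := (1, [1, 5, -1, 1000])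

def Spec_minimum_magic_tricks (T : Int) (heights : List Int) (out : List Int) : Prop := out = minimum_magic_tricks_alt T heights
instance (T : Int) (heights : List Int) (out : List Int) : Decidable (Spec_minimum_magic_tricks T heights out) := by unfold Spec_minimum_magic_tricks; infer_instance

-- ===== CLAIM (what is proved, stated in full; the proofs are below) =====
def Claim_equal_minimum_magic_tricks : Prop := ∀ (T : Int) (heights : List Int), Dom_minimum_magic_tricks T heights → Pre_minimum_magic_tricks T heights → Spec_minimum_magic_tricks T heights (minimum_magic_tricks T heights)

-- ===== LEMMAS AND PROOFS =====

theorem pyGetD_append_left (xs ys : List Int) (t : Int) (d : Int)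
    (h0 : 0 ≤ t) (h1 : t < xs.length) :
    PySem.List.pyGetD (xs ++ ys) t d = PySem.List.pyGetD xs t d := by
  rw [PySem.List.pyGetD_eq_getElem (xs ++ ys) d h0 (by simp; omega),
      PySem.List.pyGetD_eq_getElem xs d h0 (by simpa using h1)]
  rw [List.getElem_append_left]

theorem innerLoopA_spec (m : List Int) (i : Int) : ∀ sum1 j,
    innerLoopA m i sum1 j =
      sum1 + 2 * ((PySem.List.pyRange j (i - 1) 1).map (fun t => PySem.List.pyGetD m t 0)).sum := by
  intro sum1 j
  by_cases h : j < i - 1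
  · rw [innerLoopA, if_pos h, innerLoopA_spec m i _ (j+1),
        PySem.List.pyRange_one_cons h]
    simp [List.sum_cons]; ring
  · rw [innerLoopA, if_neg h, PySem.List.pyRange_one_eq_nil (by omega)]
    simp
termination_by _ j => (i - 1 - j).toNat
decreasing_by omega

theorem set_append_cons (xs ys : List Int) (y v : Int) :
    (xs ++ y :: ys).set xs.length v = xs ++ v :: ys := by
  induction xs with
  | nil => simp
  | cons a as ih => simp [ih]

theorem loop_inv (n : Nat) (h3 : 3 ≤ n) (hle : n ≤ 1001) :
    (PySem.List.pyRange 3 (n : Int) 1).foldl stepA m0A =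
      ((PySem.List.pyRange 3 (n : Int) 1).foldl stepB ([0, 1, 1], 1)).1
        ++ List.replicate (1001 - n) 0 ∧
    ((PySem.List.pyRange 3 (n : Int) 1).foldl stepB ([0, 1, 1], 1)).1.length = n ∧
    ((PySem.List.pyRange 3 (n : Int) 1).foldl stepB ([0, 1, 1], 1)).2 =
      ((PySem.List.pyRange 1 ((n : Int) - 1) 1).map
        (fun t => PySem.List.pyGetD ((PySem.List.pyRange 3 (n : Int) 1).foldl stepB ([0, 1, 1], 1)).1 t 0)).sum := by
  induction n with
  | zero => omega
  | succ k ih =>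
    by_cases hk : k < 3
    · -- base case n = 3
      have hk3 : k = 2 := by omega
      subst hk3
      refine ⟨?_, ?_, ?_⟩
      · rw [PySem.List.pyRange_one_eq_nil (by norm_num)]
        simp only [List.foldl_nil]
        show m0A = [0,1,1] ++ List.replicate (1001 - 3) 0
        unfold m0A
        rw [PySem.List.pySetD_of_nonneg _ _ (by norm_num), PySem.List.pySetD_of_nonneg _ _ (by norm_num),
            show List.replicate 1001 (0:Int) = 0 :: 0 :: 0 :: List.replicate 998 0 by
              rw [show (1001:Nat) = 3 + 998 by norm_num, List.replicate_add]; rfl]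
        rfl
      · rw [PySem.List.pyRange_one_eq_nil (by norm_num)]; rfl
      · rw [PySem.List.pyRange_one_eq_nil (by norm_num)]
        norm_num
        decide
    · -- inductive step: k ≥ 3
      obtain ⟨hA, hLen, hSum⟩ := ih (by omega) (by omega)
      have hcast : ((k + 1 : Nat) : Int) = (k : Int) + 1 := by push_cast; ring
      rw [hcast, PySem.List.pyRange_one_succ_right (by exact_mod_cast by omega : (3:Int) ≤ (k:Int))]
      set B := (PySem.List.pyRange 3 (k : Int) 1).foldl stepB ([0, 1, 1], 1) with hB
      set A := (PySem.List.pyRange 3 (k : Int) 1).foldl stepA m0A with hA'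
      rw [List.foldl_append, List.foldl_append]
      simp only [List.foldl_cons, List.foldl_nil]
      -- compute the appended value on both sides
      have hval : PySem.Int.mod (innerLoopA A (k : Int) 1 1) 1000000007
          = PySem.Int.mod (1 + 2 * B.2) 1000000007 := by
        have : innerLoopA A (k : Int) 1 1 = 1 + 2 * B.2 := by
          rw [innerLoopA_spec]
          rw [hSum]
          congr 1
          refine congrArg (HMul.hMul 2) (congrArg List.sum (List.map_congr_left ?_))
          intro t ht
          rw [PySem.List.mem_pyRange_one] at ht
          rw [hA]
          exact pyGetD_append_left B.1 _ t 0 (by omega) (by omega)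
        rw [this]
      -- the B step
      have hstepB : stepB B (k : Int) =
          (B.1 ++ [PySem.Int.mod (1 + 2 * B.2) 1000000007],
           B.2 + PySem.List.pyGetD (B.1 ++ [PySem.Int.mod (1 + 2 * B.2) 1000000007]) ((k:Int) - 1) 0) := rfl
      have hrepl : List.replicate (1001 - k) (0:Int) = 0 :: List.replicate (1000 - k) 0 := by
        rw [show 1001 - k = (1000 - k) + 1 by omega]
        simp [List.replicate_succ]
      have hstepA : stepA A (k : Int) =
          (B.1 ++ [PySem.Int.mod (1 + 2 * B.2) 1000000007]) ++ List.replicate (1000 - k) 0 := by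
        unfold stepA
        rw [hval, show ((k:Int)) = ((k:Nat):Int) by rfl, PySem.List.pySetD_natCast]
        rw [hA, hrepl, ← hLen, set_append_cons]
        simp
      refine ⟨?_, ?_, ?_⟩
      · rw [hstepA, hstepB]
        simp [show 1001 - (k+1) = 1000 - k by omega]
      · rw [hstepB]; simp [hLen]
      · rw [hstepB]
        simp only
        rw [show ((k:Int)) + 1 - 1 = ((k:Int) - 1) + 1 by ring,
            PySem.List.pyRange_one_succ_right (by omega : (1:Int) ≤ (k:Int) - 1)]
        rw [List.map_append, List.sum_append]
        simp only [List.map_cons, List.map_nil, List.sum_cons, List.sum_nil, Int.add_zero]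
        congr 1
        rw [hSum]
        refine congrArg List.sum (List.map_congr_left ?_)
        intro t ht
        rw [PySem.List.mem_pyRange_one] at ht
        rw [pyGetD_append_left B.1 _ t 0 (by omega) (by omega)]

-- at n = 1001 the padding is empty: the two tables coincide
theorem tables_eq :
    (PySem.List.pyRange 3 1001 1).foldl stepA m0A =
      ((PySem.List.pyRange 3 1001 1).foldl stepB ([0, 1, 1], 1)).1 := by
  have h := (loop_inv 1001 (by norm_num) (by norm_num)).1
  norm_num at h
  exact_mod_cast h

-- ===== VERDICT (by name: the statement is the Claim_ definition above) =====
theorem minimum_magic_tricks_spec : Claim_equal_minimum_magic_tricks := by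
  intro T heights _ _
  unfold Spec_minimum_magic_tricks minimum_magic_tricks minimum_magic_tricks_alt
  simp only [tables_eq]
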